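-- pv_equiv track=rewrite | github.com/BTkachenko/KIKD | labs/lab6/encoder4.py | high_pass_filter
-- ===== SOURCE A (Python) =====
-- def high_pass_filter(pixels, width, height):
--     filtered_pixels = []
--     for y in range(height):
--         for x in range(width):
--             original = pixels[y * width + x]
--             sum_r, sum_g, sum_b = 0, 0, 0
--             count = 0
--             for dy in range(-1, 2):
--                 for dx in range(-1, 2):
--                     nx, ny = x + dx, y + dy
--                     if 0 <= nx < width and 0 <= ny < height:
--                         r, g, b = pixels[ny * width + nx]
--                         sum_r += r
--                         sum_g += g
--                         sum_b += b
--                         count += 1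
--             avg_r, avg_g, avg_b = sum_r // count, sum_g // count, sum_b // count
--             filtered_r = min(255, max(0, original[0] + (original[0] - avg_r)))
--             filtered_g = min(255, max(0, original[1] + (original[1] - avg_g)))
--             filtered_b = min(255, max(0, original[2] + (original[2] - avg_b)))
--             filtered_pixels.append((filtered_r, filtered_g, filtered_b))
--     return filtered_pixels
-- ===== SOURCE B (Python) =====
-- def high_pass_filter(pixels, width, height):
--     # Separable box sum: pass 1 builds clamped vertical sums per pixel,
--     # pass 2 combines three horizontal neighbours of those column sums.
--     vsum = []
--     for y in range(height):
--         for x in range(width):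
--             sr = sg = sb = 0
--             c = 0
--             for ny in (y - 1, y, y + 1):
--                 if 0 <= ny < height:
--                     r, g, b = pixels[ny * width + x]
--                     sr += r
--                     sg += g
--                     sb += b
--                     c += 1
--             vsum.append((sr, sg, sb, c))
--     out = []
--     for y in range(height):
--         for x in range(width):
--             sr = sg = sb = 0
--             c = 0
--             for nx in (x - 1, x, x + 1):
--                 if 0 <= nx < width:
--                     vr, vg, vb, vc = vsum[y * width + nx]
--                     sr += vr
--                     sg += vg
--                     sb += vb
--                     c += vc
--             r0, g0, b0 = pixels[y * width + x]
--             out.append((min(255, max(0, 2 * r0 - sr // c)),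
--                         min(255, max(0, 2 * g0 - sg // c)),
--                         min(255, max(0, 2 * b0 - sb // c))))
--     return out
-- ===== Notes on version B (the rewrite author's own statement) =====
-- stated objective: alternative
-- what changed: Replaces A's per-pixel 3x3 guarded neighbourhood scan by a separable box filter: a first pass building clamped vertical (column) sums per pixel, then a second pass that combines three horizontal neighbours of those column sums before averaging, clamping and sharpening.
import Mathlib
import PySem

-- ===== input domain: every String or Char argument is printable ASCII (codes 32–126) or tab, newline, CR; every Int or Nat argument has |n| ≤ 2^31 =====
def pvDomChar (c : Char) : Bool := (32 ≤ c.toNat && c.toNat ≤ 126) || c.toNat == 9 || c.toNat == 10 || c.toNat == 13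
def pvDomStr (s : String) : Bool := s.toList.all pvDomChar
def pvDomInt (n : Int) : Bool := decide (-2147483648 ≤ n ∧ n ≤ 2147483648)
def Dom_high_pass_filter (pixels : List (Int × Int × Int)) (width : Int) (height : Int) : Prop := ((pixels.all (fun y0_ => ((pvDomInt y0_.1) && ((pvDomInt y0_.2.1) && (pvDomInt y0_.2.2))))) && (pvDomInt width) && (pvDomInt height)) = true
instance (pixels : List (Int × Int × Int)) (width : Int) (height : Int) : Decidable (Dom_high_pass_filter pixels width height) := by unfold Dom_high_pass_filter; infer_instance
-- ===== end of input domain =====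

-- B replaces A's per-pixel 3x3 guarded neighbourhood scan with a separable box filter:
-- one pass of clamped vertical (column) sums, then a horizontal combine of three of them.
-- Objective: alternative (same exact values, different algorithm; no speed claim).

-- ===== PORT A =====
def pvAsum (pixels : List (Int × Int × Int)) (width height x y : Int) : Int × Int × Int × Int :=
  (PySem.List.pyRange (-1) 2 1).foldl (fun s dy =>
    (PySem.List.pyRange (-1) 2 1).foldl (fun s dx =>
      let nx := x + dx
      let ny := y + dy
      if (0 ≤ nx ∧ nx < width) ∧ (0 ≤ ny ∧ ny < height) then
        let p := PySem.List.pyGetD pixels (ny * width + nx) (0, 0, 0)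
        (s.1 + p.1, s.2.1 + p.2.1, s.2.2.1 + p.2.2, s.2.2.2 + 1)
      else s) s) (0, 0, 0, 0)

def pvApix (pixels : List (Int × Int × Int)) (width height y x : Int) : Int × Int × Int :=
  let original := PySem.List.pyGetD pixels (y * width + x) (0, 0, 0)
  let s := pvAsum pixels width height x y
  let avg_r := PySem.Int.floordiv s.1 s.2.2.2
  let avg_g := PySem.Int.floordiv s.2.1 s.2.2.2
  let avg_b := PySem.Int.floordiv s.2.2.1 s.2.2.2
  (min 255 (max 0 (original.1 + (original.1 - avg_r))),
   min 255 (max 0 (original.2.1 + (original.2.1 - avg_g))),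
   min 255 (max 0 (original.2.2 + (original.2.2 - avg_b))))

def high_pass_filter (pixels : List (Int × Int × Int)) (width : Int) (height : Int) : List (Int × Int × Int) :=
  (PySem.List.pyRange 0 height 1).foldl (fun acc y =>
    (PySem.List.pyRange 0 width 1).foldl (fun acc x =>
      acc ++ [pvApix pixels width height y x]) acc) []

-- ===== PORT B =====
-- pass 1: clamped vertical sum (r,g,b,count) at column x, row y
def pvVsumAt (pixels : List (Int × Int × Int)) (width height x y : Int) : Int × Int × Int × Int :=
  [y - 1, y, y + 1].foldl (fun s ny =>
    if 0 ≤ ny ∧ ny < height then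
      let p := PySem.List.pyGetD pixels (ny * width + x) (0, 0, 0)
      (s.1 + p.1, s.2.1 + p.2.1, s.2.2.1 + p.2.2, s.2.2.2 + 1)
    else s) (0, 0, 0, 0)

-- pass 2: combine the three horizontal neighbours of the column sums
def pvBsumL (vsum : List (Int × Int × Int × Int)) (width y x : Int) : Int × Int × Int × Int :=
  [x - 1, x, x + 1].foldl (fun s nx =>
    if 0 ≤ nx ∧ nx < width then
      let v := PySem.List.pyGetD vsum (y * width + nx) (0, 0, 0, 0)
      (s.1 + v.1, s.2.1 + v.2.1, s.2.2.1 + v.2.2.1, s.2.2.2 + v.2.2.2)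
    else s) (0, 0, 0, 0)

def pvBpix (pixels : List (Int × Int × Int)) (vsum : List (Int × Int × Int × Int))
    (width y x : Int) : Int × Int × Int :=
  let s := pvBsumL vsum width y x
  let o := PySem.List.pyGetD pixels (y * width + x) (0, 0, 0)
  (min 255 (max 0 (2 * o.1 - PySem.Int.floordiv s.1 s.2.2.2)),
   min 255 (max 0 (2 * o.2.1 - PySem.Int.floordiv s.2.1 s.2.2.2)),
   min 255 (max 0 (2 * o.2.2 - PySem.Int.floordiv s.2.2.1 s.2.2.2)))

def high_pass_filter_alt (pixels : List (Int × Int × Int)) (width : Int) (height : Int) : List (Int × Int × Int) :=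
  let vsum := (PySem.List.pyRange 0 height 1).foldl (fun acc y =>
    (PySem.List.pyRange 0 width 1).foldl (fun acc x =>
      acc ++ [pvVsumAt pixels width height x y]) acc) []
  (PySem.List.pyRange 0 height 1).foldl (fun acc y =>
    (PySem.List.pyRange 0 width 1).foldl (fun acc x =>
      acc ++ [pvBpix pixels vsum width y x]) acc) []

-- ===== PRECONDITION & SPEC =====
-- Pre_ excludes exactly the inputs where Python A raises IndexError: a positive grid
-- whose pixel list is shorter than width*height.
def Pre_high_pass_filter (pixels : List (Int × Int × Int)) (width : Int) (height : Int) : Prop :=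
  0 < width → 0 < height → width * height ≤ (pixels.length : Int)
instance (pixels : List (Int × Int × Int)) (width : Int) (height : Int) : Decidable (Pre_high_pass_filter pixels width height) := by unfold Pre_high_pass_filter; infer_instance
def pvWitness_high_pass_filter : (List (Int × Int × Int)) × Int × Int :=
  ([(10, 20, 30), (40, 50, 60), (7, 8, 9), (100, 110, 120)], 2, 2)

def Spec_high_pass_filter (pixels : List (Int × Int × Int)) (width : Int) (height : Int) (out : List (Int × Int × Int)) : Prop := out = high_pass_filter_alt pixels width height
instance (pixels : List (Int × Int × Int)) (width : Int) (height : Int) (out : List (Int × Int × Int)) : Decidable (Spec_high_pass_filter pixels width height out) := by unfold Spec_high_pass_filter; infer_instance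

-- ===== CLAIM (what is proved, stated in full; the proofs are below) =====
def Claim_equal_high_pass_filter : Prop := ∀ (pixels : List (Int × Int × Int)) (width : Int) (height : Int), Dom_high_pass_filter pixels width height → Pre_high_pass_filter pixels width height → Spec_high_pass_filter pixels width height (high_pass_filter pixels width height)

-- ===== LEMMAS AND PROOFS =====

theorem pv_ite_and (p q : Prop) [Decidable p] [Decidable q] {α : Type} (a b : α) :
    (if p ∧ q then a else b) = if p then (if q then a else b) else b := by
  split_ifs <;> tauto

theorem pv_pyRange_m1_2 : PySem.List.pyRange (-1) 2 1 = [-1, 0, 1] := by decide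

-- canonical form of B's first pass
def pvVS (pixels : List (Int × Int × Int)) (width height : Int) : List (Int × Int × Int × Int) :=
  (PySem.List.pyRange 0 height 1).flatMap (fun y =>
    (PySem.List.pyRange 0 width 1).map (fun x => pvVsumAt pixels width height x y))

theorem pv_len_flatMap_range {α : Type} (f : ℕ → ℕ → α) (H W : ℕ) :
    ((List.range H).flatMap (fun a => (List.range W).map (f a))).length = H * W := by
  simp [List.length_flatMap, List.map_const']

theorem pv_getElem?_flatMap_range {α : Type} (f : ℕ → ℕ → α) (H W y x : ℕ)
    (hy : y < H) (hx : x < W) :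
    ((List.range H).flatMap (fun a => (List.range W).map (f a)))[y * W + x]? = some (f y x) := by
  induction H with
  | zero => omega
  | succ H ih =>
    rw [List.range_succ, List.flatMap_append]
    by_cases h : y < H
    · rw [List.getElem?_append_left (by rw [pv_len_flatMap_range]; nlinarith)]
      exact ih h
    · have hyH : y = H := by omega
      subst hyH
      rw [List.getElem?_append_right (by rw [pv_len_flatMap_range]; omega)]
      simp [List.getElem?_range hx]

theorem pv_VS_lookup (pixels : List (Int × Int × Int)) (width height y nx : Int)
    (hy : 0 ≤ y) (hy' : y < height) (hx : 0 ≤ nx) (hx' : nx < width) :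
    PySem.List.pyGetD (pvVS pixels width height) (y * width + nx) (0, 0, 0, 0)
      = pvVsumAt pixels width height nx y := by
  have hw : (0:Int) ≤ width := by omega
  have hh : (0:Int) ≤ height := by omega
  have hidx : y * width + nx = ((y.toNat * width.toNat + nx.toNat : ℕ) : Int) := by
    push_cast [Int.toNat_of_nonneg hy, Int.toNat_of_nonneg hx, Int.toNat_of_nonneg hw]
    ring
  unfold pvVS
  rw [PySem.List.pyRange_one, PySem.List.pyRange_one, hidx, PySem.List.pyGetD_natCast]
  simp only [List.flatMap_map, List.map_map, Function.comp_def, sub_zero, zero_add]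
  rw [List.getD_eq_getElem?_getD,
    pv_getElem?_flatMap_range (fun a b => pvVsumAt pixels width height (b : Int) (a : Int))
      height.toNat width.toNat y.toNat nx.toNat (by omega) (by omega)]
  simp [Int.toNat_of_nonneg hy, Int.toNat_of_nonneg hx]

-- per-pixel: A's 3x3 guarded sum equals B's horizontal combine of vertical sums
def pvZ4 : Int × Int × Int × Int := (0, 0, 0, 0)

def pvAdd4 (s t : Int × Int × Int × Int) : Int × Int × Int × Int :=
  (s.1 + t.1, s.2.1 + t.2.1, s.2.2.1 + t.2.2.1, s.2.2.2 + t.2.2.2)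

theorem pv_guard_step (c : Prop) [Decidable c] (s : Int × Int × Int × Int)
    (v : Int × Int × Int) (k : Int) :
    (if c then (s.1 + v.1, s.2.1 + v.2.1, s.2.2.1 + v.2.2, s.2.2.2 + k) else s)
      = pvAdd4 s (if c then (v.1, v.2.1, v.2.2, k) else pvZ4) := by
  split_ifs <;> simp [pvAdd4, pvZ4]

theorem pv_guard_step4 (c : Prop) [Decidable c] (s v : Int × Int × Int × Int) :
    (if c then (s.1 + v.1, s.2.1 + v.2.1, s.2.2.1 + v.2.2.1, s.2.2.2 + v.2.2.2) else s)
      = pvAdd4 s (if c then v else pvZ4) := by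
  split_ifs <;> simp [pvAdd4, pvZ4]

theorem pv_sum_eq (pixels : List (Int × Int × Int)) (width height x y : Int)
    (hx : 0 ≤ x) (hx' : x < width) (hy : 0 ≤ y) (hy' : y < height) :
    pvAsum pixels width height x y
      = [x - 1, x, x + 1].foldl (fun s nx =>
          if 0 ≤ nx ∧ nx < width then
            let v := pvVsumAt pixels width height nx y
            (s.1 + v.1, s.2.1 + v.2.1, s.2.2.1 + v.2.2.1, s.2.2.2 + v.2.2.2)
          else s) (0, 0, 0, 0) := by
  unfold pvAsum pvVsumAt
  rw [pv_pyRange_m1_2]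
  have a1 : (0:Int) ≤ x + 1 := by omega
  have a2 : x - 1 < width := by omega
  have a3 : (0:Int) ≤ y + 1 := by omega
  have a4 : y - 1 < height := by omega
  simp only [pv_guard_step, pv_guard_step4, List.foldl_cons, List.foldl_nil,
    pv_ite_and, ← sub_eq_add_neg, add_zero, hx, hx', hy, hy', a1, a2, a3, a4, if_true]
  split_ifs <;> simp only [pvAdd4, pvZ4, Prod.mk.injEq] <;>
    refine ⟨by ring, by ring, by ring, by ring⟩

theorem pv_pix_eq (pixels : List (Int × Int × Int)) (width height y x : Int)
    (hx : 0 ≤ x) (hx' : x < width) (hy : 0 ≤ y) (hy' : y < height) :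
    pvApix pixels width height y x
      = pvBpix pixels (pvVS pixels width height) width y x := by
  have hB : pvBsumL (pvVS pixels width height) width y x
      = [x - 1, x, x + 1].foldl (fun s nx =>
          if 0 ≤ nx ∧ nx < width then
            let v := pvVsumAt pixels width height nx y
            (s.1 + v.1, s.2.1 + v.2.1, s.2.2.1 + v.2.2.1, s.2.2.2 + v.2.2.2)
          else s) (0, 0, 0, 0) := by
    unfold pvBsumL
    have a1 : (0:Int) ≤ x + 1 := by omega
    have a2 : x - 1 < width := by omega
    have Lc := pv_VS_lookup pixels width height y x hy hy' hx hx'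
    simp only [pv_guard_step4, List.foldl_cons, List.foldl_nil, pv_ite_and,
      hx, hx', a1, a2, if_true, Lc]
    split_ifs with h1 h2
    · rw [pv_VS_lookup pixels width height y (x-1) hy hy' (by omega) (by omega),
        pv_VS_lookup pixels width height y (x+1) hy hy' (by omega) (by omega)]
    · rw [pv_VS_lookup pixels width height y (x-1) hy hy' (by omega) (by omega)]
    · rw [pv_VS_lookup pixels width height y (x+1) hy hy' (by omega) (by omega)]
    · rfl
  unfold pvApix pvBpix
  rw [hB, ← pv_sum_eq pixels width height x y hx hx' hy hy']
  simp only [Prod.mk.injEq]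
  refine ⟨by omega, by omega, by omega⟩
theorem pv_A_flat (pixels : List (Int × Int × Int)) (width height : Int) :
    high_pass_filter pixels width height
      = (PySem.List.pyRange 0 height 1).flatMap (fun y =>
          (PySem.List.pyRange 0 width 1).map (fun x => pvApix pixels width height y x)) := by
  unfold high_pass_filter
  simp only [PySem.List.foldl_append_singleton_eq_map, PySem.List.foldl_append_eq_flatMap,
    List.nil_append]

theorem pv_B_flat (pixels : List (Int × Int × Int)) (width height : Int) :
    high_pass_filter_alt pixels width height
      = (PySem.List.pyRange 0 height 1).flatMap (fun y =>
          (PySem.List.pyRange 0 width 1).map (fun x =>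
            pvBpix pixels (pvVS pixels width height) width y x)) := by
  unfold high_pass_filter_alt pvVS
  simp only [PySem.List.foldl_append_singleton_eq_map, PySem.List.foldl_append_eq_flatMap,
    List.nil_append]

-- ===== VERDICT (by name: the statement is the Claim_ definition above) =====
theorem high_pass_filter_spec : Claim_equal_high_pass_filter := by
  intro pixels width height _ _
  unfold Spec_high_pass_filter
  rw [pv_A_flat, pv_B_flat]
  unfold List.flatMap
  congr 1
  apply List.map_congr_left
  intro y hymem
  apply List.map_congr_left
  intro x hxmem
  rw [PySem.List.mem_pyRange_one] at hymem hxmem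
  exact pv_pix_eq pixels width height y x hxmem.1 hxmem.2 hymem.1 hymem.2
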